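-- pv_equiv track=rewrite | github.com/sumara523/Assignment6 | Problem1/Problem1.py | URLSplit
-- ===== SOURCE A (Python) =====
-- def URLSplit(input):
--     input = input.replace(":/", "")
--
--     input = input.split("/")
--
--     if len(input) > 3:
--         for i in range (2, len(input)):
--             if i == len(input) - 1:
--                 input[2] = input[2] + input[i]
--             elif i == 2:
--                 input[2] = input[i] + "/"
--             else:
--                 input[2] = input[2] + input[i] + "/"
--
--     input = [input[0],input[1], input[2]]
--     return input
-- ===== SOURCE B (Python) =====
-- def URLSplit(input):
--     parts = input.replace(":/", "").split("/", 2)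
--     return [parts[0], parts[1], parts[2]]
-- ===== Notes on version B (the rewrite author's own statement) =====
-- stated objective: simpler
-- what changed: B replaces A's full split followed by an index loop that re-joins parts[2:] element by element (with first/middle/last cases) with a single split("/", 2) whose last piece is already the unsplit remainder, then indexes the three components directly.
-- outside the precondition, e.g. on URLSplit(':/'): A raises IndexError, B raises IndexError; on URLSplit('/'): A raises IndexError, B raises IndexError
import Mathlib
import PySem

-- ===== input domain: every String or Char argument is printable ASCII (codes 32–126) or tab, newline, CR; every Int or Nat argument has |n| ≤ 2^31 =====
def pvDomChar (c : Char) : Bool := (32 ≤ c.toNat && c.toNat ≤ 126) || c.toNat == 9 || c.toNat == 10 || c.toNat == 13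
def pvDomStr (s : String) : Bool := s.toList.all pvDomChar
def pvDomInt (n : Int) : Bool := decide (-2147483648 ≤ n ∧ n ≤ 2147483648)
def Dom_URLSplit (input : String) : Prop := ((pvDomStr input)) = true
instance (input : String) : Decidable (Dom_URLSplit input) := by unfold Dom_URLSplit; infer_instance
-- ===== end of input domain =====

-- B replaces A's index loop that re-joins the tail with a single split(maxsplit=2),
-- whose last piece is the unsplit remainder (objective: simpler/idiomatic; same cost).

-- ===== PORT A =====
-- literal port of A; the string work is done on List Char via PySem.Chars (exact);
-- the final input[0]/input[1]/input[2] raise IndexError on short splits: excluded by Pre_ below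
def URLSplit (input : String) : List String :=
  -- input = input.replace(":/", "")
  let cs : List Char := PySem.Chars.replace input.toList [':', '/'] []
  -- input = input.split("/")
  let parts : List (List Char) := PySem.Chars.splitOn cs ['/']
  -- if len(input) > 3: for i in range(2, len(input)): …
  let parts : List (List Char) :=
    if 3 < parts.length then
      (PySem.List.pyRange 2 (parts.length : Int) 1).foldl
        (fun ps i =>
          if i = (ps.length : Int) - 1 then
            ps.set 2 (PySem.List.pyGetD ps 2 [] ++ PySem.List.pyGetD ps i [])
          else if i = 2 then
            ps.set 2 (PySem.List.pyGetD ps i [] ++ ['/'])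
          else
            ps.set 2 (PySem.List.pyGetD ps 2 [] ++ PySem.List.pyGetD ps i [] ++ ['/']))
        parts
    else parts
  -- input = [input[0], input[1], input[2]]
  [String.ofList (PySem.List.pyGetD parts 0 []),
   String.ofList (PySem.List.pyGetD parts 1 []),
   String.ofList (PySem.List.pyGetD parts 2 [])]

-- ===== PORT B =====
-- literal port of Source B: parts = input.replace(":/","").split("/", 2); [parts[0],parts[1],parts[2]]
def URLSplit_alt (input : String) : List String :=
  let parts : List (List Char) :=
    match PySem.Chars.splitMax? (PySem.Chars.replace input.toList [':', '/'] []) ['/'] 2 with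
    | some ps => ps
    | none => []   -- unreachable: the separator "/" is nonempty
  [String.ofList (PySem.List.pyGetD parts 0 []),
   String.ofList (PySem.List.pyGetD parts 1 []),
   String.ofList (PySem.List.pyGetD parts 2 [])]

-- ===== PRECONDITION & SPEC =====
-- Pre_ excludes exactly the inputs where A raises IndexError: after removing ":/" the string
-- must still contain at least two "/" (so the split has at least three components); B raises there too.
def Pre_URLSplit (input : String) : Prop :=
  2 ≤ PySem.Str.count (PySem.Str.replace input ":/" "") "/"
instance (input : String) : Decidable (Pre_URLSplit input) := by unfold Pre_URLSplit; infer_instance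
def pvWitness_URLSplit : String := "http://host/path/to/file"

def Spec_URLSplit (input : String) (out : List String) : Prop := out = URLSplit_alt input
instance (input : String) (out : List String) : Decidable (Spec_URLSplit input out) := by unfold Spec_URLSplit; infer_instance

-- ===== CLAIM (what is proved, stated in full; the proofs are below) =====
def Claim_equal_URLSplit : Prop := ∀ (input : String), Dom_URLSplit input → Pre_URLSplit input → Spec_URLSplit input (URLSplit input)

-- ===== LEMMAS AND PROOFS =====

-- reference splitter: Python's s.split("/") written as plain structural recursion
def consHd (c : Char) : List (List Char) → List (List Char)
  | [] => [[c]]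
  | h :: t => (c :: h) :: t

def mySplit : List Char → List (List Char)
  | [] => [[]]
  | c :: r => if c = '/' then [] :: mySplit r else consHd c (mySplit r)

-- prepend a prefix to the head component
def consPre (p : List Char) : List (List Char) → List (List Char)
  | [] => [p]
  | h :: t => (p ++ h) :: t

-- reference maxsplit=2 splitter
def myCap : Nat → List Char → List (List Char)
  | 0, l => [l]
  | _ + 1, [] => [[]]
  | m + 1, c :: r => if c = '/' then [] :: myCap m r else consHd c (myCap (m + 1) r)

theorem ic_cons_cons (s x y : List Char) (zs : List (List Char)) :
    List.intercalate s (x :: y :: zs) = x ++ s ++ List.intercalate s (y :: zs) := by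
  simp [List.intercalate]

theorem ic_single (s x : List Char) : List.intercalate s [x] = x := by
  simp [List.intercalate]

theorem ic_cons_head (s a : List Char) (c : Char) (b : List (List Char)) :
    List.intercalate s ((c :: a) :: b) = c :: List.intercalate s (a :: b) := by
  cases b <;> simp [List.intercalate]

theorem mySplit_ne_nil (l : List Char) : mySplit l ≠ [] := by
  cases l with
  | nil => simp [mySplit]
  | cons c r =>
    simp only [mySplit]
    split_ifs
    · simp
    · cases h : mySplit r <;> simp [consHd]

theorem myCap_ne_nil (m : Nat) (l : List Char) : myCap m l ≠ [] := by
  induction l generalizing m with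
  | nil => cases m <;> simp [myCap]
  | cons c r ih =>
    cases m with
    | zero => simp [myCap]
    | succ m' =>
      simp only [myCap]
      split_ifs
      · simp
      · cases h : myCap (m' + 1) r <;> simp [consHd]

theorem consPre_consHd (p : List Char) (c : Char) (ts : List (List Char)) :
    consPre p (consHd c ts) = consPre (p ++ [c]) ts := by
  cases ts <;> simp [consPre, consHd]

-- single-step unfoldings of the PySem fuel loops
theorem sgo_nil (fuel : Nat) (cur : List Char) (acc : List (List Char)) :
    PySem.Chars.splitOn.go ['/'] fuel [] cur acc = (cur.reverse :: acc).reverse := by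
  cases fuel <;> rw [PySem.Chars.splitOn.go] <;> simp

theorem sgo_cons (n : Nat) (c : Char) (rest cur : List Char) (acc : List (List Char)) :
    PySem.Chars.splitOn.go ['/'] (n+1) (c :: rest) cur acc =
      (if c = '/' then PySem.Chars.splitOn.go ['/'] n rest [] (cur.reverse :: acc)
       else PySem.Chars.splitOn.go ['/'] n rest (c :: cur) acc) := by
  rw [PySem.Chars.splitOn.go]
  have hp : List.isPrefixOf ['/'] (c :: rest) = (c == '/') := by
    simp [List.isPrefixOf, eq_comm]
  by_cases hc : c = '/' <;> simp [hp, hc]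

theorem mgo_nil (fuel m : Nat) (cur : List Char) (acc : List (List Char)) :
    PySem.Chars.splitOnMax.go ['/'] fuel m [] cur acc = (cur.reverse :: acc).reverse := by
  cases fuel <;> rw [PySem.Chars.splitOnMax.go] <;> simp

theorem mgo_zero (n : Nat) (l cur : List Char) (acc : List (List Char)) :
    PySem.Chars.splitOnMax.go ['/'] n 0 l cur acc = ((cur.reverse ++ l) :: acc).reverse := by
  cases n <;> cases l <;> rw [PySem.Chars.splitOnMax.go] <;> simp

theorem mgo_cons (n m : Nat) (c : Char) (rest cur : List Char) (acc : List (List Char)) :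
    PySem.Chars.splitOnMax.go ['/'] (n+1) (m+1) (c :: rest) cur acc =
      (if c = '/' then PySem.Chars.splitOnMax.go ['/'] n m rest [] (cur.reverse :: acc)
       else PySem.Chars.splitOnMax.go ['/'] n (m+1) rest (c :: cur) acc) := by
  rw [PySem.Chars.splitOnMax.go]
  have hp : List.isPrefixOf ['/'] (c :: rest) = (c == '/') := by
    simp [List.isPrefixOf, eq_comm]
  by_cases hc : c = '/' <;> simp [hp, hc]

theorem cgo_nil (fuel : Nat) (acc : Nat) :
    PySem.Chars.count.go ['/'] fuel [] acc = acc := by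
  cases fuel <;> rw [PySem.Chars.count.go] <;> simp

theorem cgo_cons (n : Nat) (c : Char) (rest : List Char) (acc : Nat) :
    PySem.Chars.count.go ['/'] (n+1) (c :: rest) acc =
      (if c = '/' then PySem.Chars.count.go ['/'] n rest (acc+1)
       else PySem.Chars.count.go ['/'] n rest acc) := by
  rw [PySem.Chars.count.go]
  have hp : List.isPrefixOf ['/'] (c :: rest) = (c == '/') := by
    simp [List.isPrefixOf, eq_comm]
  by_cases hc : c = '/' <;> simp [hp, hc]

theorem splitOn_go_eq (fuel : Nat) : ∀ (l cur : List Char) (acc : List (List Char)),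
    l.length < fuel →
    PySem.Chars.splitOn.go ['/'] fuel l cur acc = acc.reverse ++ consPre cur.reverse (mySplit l) := by
  induction fuel with
  | zero => intro l cur acc h; omega
  | succ n ih =>
    intro l cur acc h
    cases l with
    | nil => rw [sgo_nil]; simp [mySplit, consPre]
    | cons c rest =>
      rw [sgo_cons]
      simp only [List.length_cons] at h
      by_cases hc : c = '/'
      · rw [if_pos hc, ih rest [] (cur.reverse :: acc) (by omega)]
        simp only [mySplit, if_pos hc]
        cases h2 : mySplit rest with
        | nil => exact absurd h2 (mySplit_ne_nil rest)
        | cons a b => simp [consPre]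
      · rw [if_neg hc, ih rest (c :: cur) acc (by omega)]
        simp [mySplit, hc, consPre_consHd]

theorem splitOn_eq_mySplit (l : List Char) : PySem.Chars.splitOn l ['/'] = mySplit l := by
  show PySem.Chars.splitOn.go ['/'] (l.length + 1) l [] [] = _
  rw [splitOn_go_eq (l.length + 1) l [] [] (by omega)]
  cases h : mySplit l with
  | nil => exact absurd h (mySplit_ne_nil l)
  | cons a b => simp [consPre]

theorem splitOnMax_go_eq (fuel : Nat) : ∀ (m : Nat) (l cur : List Char) (acc : List (List Char)),
    l.length < fuel →
    PySem.Chars.splitOnMax.go ['/'] fuel m l cur acc = acc.reverse ++ consPre cur.reverse (myCap m l) := by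
  induction fuel with
  | zero => intro m l cur acc h; omega
  | succ n ih =>
    intro m l cur acc h
    cases l with
    | nil => rw [mgo_nil]; cases m <;> simp [myCap, consPre]
    | cons c rest =>
      simp only [List.length_cons] at h
      cases m with
      | zero => rw [mgo_zero]; simp [myCap, consPre]
      | succ m' =>
        rw [mgo_cons]
        by_cases hc : c = '/'
        · rw [if_pos hc, ih m' rest [] (cur.reverse :: acc) (by omega)]
          simp only [myCap, if_pos hc]
          cases h2 : myCap m' rest with
          | nil => exact absurd h2 (myCap_ne_nil m' rest)
          | cons a b => simp [consPre]
        · rw [if_neg hc, ih (m' + 1) rest (c :: cur) acc (by omega)]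
          simp [myCap, hc, consPre_consHd]

theorem splitOnMax_eq_myCap (l : List Char) (m : Nat) :
    PySem.Chars.splitOnMax l ['/'] (m : Int) = myCap m l := by
  show (if ((m : Int) < 0) then _ else PySem.Chars.splitOnMax.go ['/'] (l.length + 1) (m : Int).toNat l [] []) = _
  rw [if_neg (by omega), show ((m : Int).toNat = m) from by omega,
    splitOnMax_go_eq (l.length + 1) m l [] [] (by omega)]
  cases h : myCap m l with
  | nil => exact absurd h (myCap_ne_nil m l)
  | cons a b => simp [consPre]

-- joining the full split with "/" restores the string
theorem intercalate_mySplit (l : List Char) : List.intercalate ['/'] (mySplit l) = l := by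
  induction l with
  | nil => simp [mySplit, List.intercalate]
  | cons c r ih =>
    simp only [mySplit]
    by_cases hc : c = '/'
    · rw [if_pos hc]
      cases h : mySplit r with
      | nil => exact absurd h (mySplit_ne_nil r)
      | cons a b =>
        rw [ic_cons_cons]
        rw [h] at ih; rw [ih, hc]; simp
    · rw [if_neg hc]
      cases h : mySplit r with
      | nil => exact absurd h (mySplit_ne_nil r)
      | cons a b =>
        rw [h] at ih
        simp [consHd, ic_cons_head, ih]

theorem myCap_step (l : List Char) : ∀ (m : Nat) (p : List Char) (t : List (List Char)),
    mySplit l = p :: t → t ≠ [] →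
    ∃ l', l = p ++ '/' :: l' ∧ mySplit l' = t ∧ myCap (m + 1) l = p :: myCap m l' := by
  induction l with
  | nil => intro m p t h ht; simp [mySplit] at h; simp [h.2] at ht
  | cons c r ih =>
    intro m p t h ht
    by_cases hc : c = '/'
    · subst hc
      simp only [mySplit, if_pos rfl] at h
      injection h with hp htr
      subst hp
      exact ⟨r, by simp, htr, by simp [myCap]⟩
    · simp only [mySplit, if_neg hc] at h
      cases h2 : mySplit r with
      | nil => exact absurd h2 (mySplit_ne_nil r)
      | cons a b =>
        rw [h2] at h; simp only [consHd] at h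
        injection h with hp ht2
        subst hp; subst ht2
        obtain ⟨l', hl', hsp, hcap⟩ := ih m a _ h2 ht
        refine ⟨l', by simp [hl'], hsp, ?_⟩
        simp only [myCap, if_neg hc, hcap, consHd]

theorem myCap_of_three (l p0 p1 p2 : List Char) (rest : List (List Char))
    (h : mySplit l = p0 :: p1 :: p2 :: rest) :
    myCap 2 l = [p0, p1, List.intercalate ['/'] (p2 :: rest)] := by
  obtain ⟨l1, _, hs1, hc1⟩ := myCap_step l 1 p0 (p1 :: p2 :: rest) h (by simp)
  obtain ⟨l2, _, hs2, hc2⟩ := myCap_step l1 0 p1 (p2 :: rest) hs1 (by simp)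
  rw [hc1, hc2]
  have hj : List.intercalate ['/'] (mySplit l2) = l2 := intercalate_mySplit l2
  rw [hs2] at hj
  simp [myCap, hj]

-- the count of "/" determines the number of split components
theorem count_go_eq (fuel : Nat) : ∀ (l : List Char) (acc : Nat),
    l.length ≤ fuel →
    PySem.Chars.count.go ['/'] fuel l acc = acc + ((mySplit l).length - 1) := by
  induction fuel with
  | zero =>
    intro l acc h
    cases l with
    | nil => rw [cgo_nil]; simp [mySplit]
    | cons c r => simp at h
  | succ n ih =>
    intro l acc h
    cases l with
    | nil => rw [cgo_nil]; simp [mySplit]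
    | cons c rest =>
      rw [cgo_cons]
      simp only [List.length_cons] at h
      have hne := mySplit_ne_nil rest
      by_cases hc : c = '/'
      · rw [if_pos hc, ih rest (acc + 1) (by omega)]
        simp only [mySplit, if_pos hc, List.length_cons]
        cases h2 : mySplit rest <;> simp_all <;> omega
      · rw [if_neg hc, ih rest acc (by omega)]
        cases h2 : mySplit rest <;> simp [mySplit, hc, h2, consHd]

theorem count_eq_mySplit_len (l : List Char) :
    PySem.Chars.count l ['/'] + 1 = (mySplit l).length := by
  show (if (List.isEmpty ['/'] = true) then l.length + 1 else PySem.Chars.count.go ['/'] l.length l 0) + 1 = _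
  rw [if_neg (by simp), count_go_eq l.length l 0 (le_refl _)]
  have := mySplit_ne_nil l
  cases h : mySplit l <;> simp_all

theorem pyRange_self (b : Int) : PySem.List.pyRange b b 1 = [] := by
  simp [PySem.List.pyRange]

-- A's re-joining loop, characterised: starting at index 3+k it appends "/".join(rest[k:]) to slot 2
theorem loopA (rest : List (List Char)) : ∀ (e : Nat), ∀ (k : Nat) (a p0 p1 : List Char),
    k + (e + 1) = rest.length →
    (PySem.List.pyRange ((3 + k : Nat) : Int) ((3 + rest.length : Nat) : Int) 1).foldl
      (fun ps i =>
        if i = (ps.length : Int) - 1 then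
          ps.set 2 (PySem.List.pyGetD ps 2 [] ++ PySem.List.pyGetD ps i [])
        else if i = 2 then
          ps.set 2 (PySem.List.pyGetD ps i [] ++ ['/'])
        else
          ps.set 2 (PySem.List.pyGetD ps 2 [] ++ PySem.List.pyGetD ps i [] ++ ['/']))
      (p0 :: p1 :: a :: rest)
    = p0 :: p1 :: (a ++ List.intercalate ['/'] (rest.drop k)) :: rest := by
  intro e
  induction e with
  | zero =>
    intro k a p0 p1 hk
    have hlt : ((3 + k : Nat) : Int) < ((3 + rest.length : Nat) : Int) := by push_cast; omega
    rw [PySem.List.pyRange_one_cons hlt, List.foldl_cons]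
    have h1 : ((3 + k : Nat) : Int) + 1 = ((3 + rest.length : Nat) : Int) := by push_cast; omega
    rw [h1, pyRange_self, List.foldl_nil]
    rw [if_pos (by simp [List.length_cons]; push_cast; omega)]
    have hklt : k < rest.length := by omega
    rw [PySem.List.pyGetD_ofNat', PySem.List.pyGetD_natCast]
    simp only [List.getD_cons_succ, List.getD_cons_zero]
    rw [show ((3:Nat) + k = k + 3) from by omega]
    simp only [List.getD_cons_succ]
    rw [List.getD_eq_getElem rest [] hklt]
    rw [List.drop_eq_getElem_cons hklt, show (k+1 = rest.length) from by omega,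
        List.drop_length]
    simp [List.set, List.intercalate]
  | succ e ih =>
    intro k a p0 p1 hk
    have hlt : ((3 + k : Nat) : Int) < ((3 + rest.length : Nat) : Int) := by push_cast; omega
    rw [PySem.List.pyRange_one_cons hlt, List.foldl_cons]
    rw [if_neg (by simp [List.length_cons]; push_cast; omega)]
    rw [if_neg (by push_cast; omega)]
    have hklt : k < rest.length := by omega
    rw [PySem.List.pyGetD_ofNat', PySem.List.pyGetD_natCast]
    simp only [List.getD_cons_succ, List.getD_cons_zero]
    rw [show ((3:Nat) + k = k + 3) from by omega]
    simp only [List.getD_cons_succ]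
    rw [List.getD_eq_getElem rest [] hklt]
    have h1 : ((k + 3 : Nat) : Int) + 1 = ((3 + (k+1) : Nat) : Int) := by push_cast; omega
    rw [h1]
    simp only [List.set]
    rw [ih (k+1) (a ++ rest[k] ++ ['/']) p0 p1 (by omega)]
    have h2 : k + 1 < rest.length := by omega
    rw [List.drop_eq_getElem_cons hklt, List.drop_eq_getElem_cons h2, ic_cons_cons]
    simp

theorem URLSplit_eq (input : String) (h : Pre_URLSplit input) :
    URLSplit input = URLSplit_alt input := by
  have hcnt : 2 ≤ PySem.Chars.count (PySem.Chars.replace input.toList [':', '/'] []) ['/'] := by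
    unfold Pre_URLSplit at h
    rw [PySem.Str.count_eq, PySem.Str.toList_replace] at h
    simpa using h
  set cs := PySem.Chars.replace input.toList [':', '/'] [] with hcs
  have hlen : 3 ≤ (mySplit cs).length := by
    rw [← count_eq_mySplit_len]; omega
  obtain ⟨p0, t0, h0⟩ : ∃ p0 t0, mySplit cs = p0 :: t0 := by
    cases hm : mySplit cs with
    | nil => exact absurd hm (mySplit_ne_nil cs)
    | cons a b => exact ⟨a, b, rfl⟩
  obtain ⟨p1, t1, rfl⟩ : ∃ p1 t1, t0 = p1 :: t1 := by
    cases t0 with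
    | nil => rw [h0] at hlen; simp at hlen
    | cons a b => exact ⟨a, b, rfl⟩
  obtain ⟨p2, rest, rfl⟩ : ∃ p2 rest, t1 = p2 :: rest := by
    cases t1 with
    | nil => rw [h0] at hlen; simp at hlen
    | cons a b => exact ⟨a, b, rfl⟩
  -- B's side
  have hB : URLSplit_alt input =
      [String.ofList p0, String.ofList p1,
       String.ofList (List.intercalate ['/'] (p2 :: rest))] := by
    simp only [URLSplit_alt]
    rw [show PySem.Chars.splitMax? (PySem.Chars.replace input.toList [':', '/'] []) ['/'] 2 =
        some (PySem.Chars.splitOnMax cs ['/'] 2) from by rw [← hcs]; simp [PySem.Chars.splitMax?]]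
    rw [show ((2 : Int) = ((2 : Nat) : Int)) from rfl, splitOnMax_eq_myCap cs 2,
        myCap_of_three cs p0 p1 p2 rest h0]
    simp [PySem.List.pyGetD_ofNat']
  -- A's side
  simp only [URLSplit]
  rw [← hcs, splitOn_eq_mySplit cs, h0]
  cases rest with
  | nil =>
    rw [if_neg (by simp)]
    rw [hB]
    simp [PySem.List.pyGetD_ofNat', ic_single]
  | cons r0 rs =>
    rw [if_pos (by simp)]
    have hloop :
        (PySem.List.pyRange 2 (((p0 :: p1 :: p2 :: r0 :: rs).length : Nat) : Int) 1).foldl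
          (fun ps i =>
            if i = (ps.length : Int) - 1 then
              ps.set 2 (PySem.List.pyGetD ps 2 [] ++ PySem.List.pyGetD ps i [])
            else if i = 2 then
              ps.set 2 (PySem.List.pyGetD ps i [] ++ ['/'])
            else
              ps.set 2 (PySem.List.pyGetD ps 2 [] ++ PySem.List.pyGetD ps i [] ++ ['/']))
          (p0 :: p1 :: p2 :: r0 :: rs)
        = p0 :: p1 :: (p2 ++ ['/'] ++ List.intercalate ['/'] (r0 :: rs)) :: r0 :: rs := by
      rw [show (((p0 :: p1 :: p2 :: r0 :: rs).length : Nat) : Int)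
            = ((3 + (r0 :: rs).length : Nat) : Int) from by simp only [List.length_cons]; push_cast; omega]
      rw [PySem.List.pyRange_one_cons (by push_cast; omega), List.foldl_cons]
      rw [if_neg (by simp only [List.length_cons]; push_cast; omega)]
      rw [if_pos rfl, PySem.List.pyGetD_ofNat']
      simp only [List.getD_cons_succ, List.getD_cons_zero, List.set]
      rw [show ((2 : Int) + 1 = ((3 + 0 : Nat) : Int)) from by omega]
      rw [loopA (r0 :: rs) ((r0 :: rs).length - 1) 0 (p2 ++ ['/']) p0 p1 (by simp)]
      simp
    rw [hloop, hB, ic_cons_cons]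
    simp [PySem.List.pyGetD_ofNat']

-- ===== VERDICT (by name: the statement is the Claim_ definition above) =====
theorem URLSplit_spec : Claim_equal_URLSplit := by
  intro input _ hpre
  exact URLSplit_eq input hpre
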